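-- pv_equiv track=rewrite | github.com/NancyBeaula/beavers-choice-multi-agent | project_starter.py | _match_item_name
-- ===== SOURCE A (Python) =====
-- paper_supplies = [
--     {"item_name": "A4 paper", "category": "paper", "unit_price": 0.05},
--     {"item_name": "Letter-sized paper", "category": "paper", "unit_price": 0.06},
--     {"item_name": "Cardstock", "category": "paper", "unit_price": 0.15},
--     {"item_name": "Colored paper", "category": "paper", "unit_price": 0.10},
--     {"item_name": "Glossy paper", "category": "paper", "unit_price": 0.20},
--     {"item_name": "Matte paper", "category": "paper", "unit_price": 0.18},
--     {"item_name": "Recycled paper", "category": "paper", "unit_price": 0.08},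
--     {"item_name": "Eco-friendly paper", "category": "paper", "unit_price": 0.12},
--     {"item_name": "Poster paper", "category": "paper", "unit_price": 0.25},
--     {"item_name": "Banner paper", "category": "paper", "unit_price": 0.30},
--     {"item_name": "Kraft paper", "category": "paper", "unit_price": 0.10},
--     {"item_name": "Construction paper", "category": "paper", "unit_price": 0.07},
--     {"item_name": "Wrapping paper", "category": "paper", "unit_price": 0.15},
--     {"item_name": "Glitter paper", "category": "paper", "unit_price": 0.22},
--     {"item_name": "Decorative paper", "category": "paper", "unit_price": 0.18},
--     {"item_name": "Letterhead paper", "category": "paper", "unit_price": 0.12},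
--     {"item_name": "Legal-size paper", "category": "paper", "unit_price": 0.08},
--     {"item_name": "Crepe paper", "category": "paper", "unit_price": 0.05},
--     {"item_name": "Photo paper", "category": "paper", "unit_price": 0.25},
--     {"item_name": "Uncoated paper", "category": "paper", "unit_price": 0.06},
--     {"item_name": "Butcher paper", "category": "paper", "unit_price": 0.10},
--     {"item_name": "Heavyweight paper", "category": "paper", "unit_price": 0.20},
--     {"item_name": "Standard copy paper", "category": "paper", "unit_price": 0.04},
--     {"item_name": "Bright-colored paper", "category": "paper", "unit_price": 0.12},
--     {"item_name": "Patterned paper", "category": "paper", "unit_price": 0.15},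
--
--     {"item_name": "Paper plates", "category": "product", "unit_price": 0.10},
--     {"item_name": "Paper cups", "category": "product", "unit_price": 0.08},
--     {"item_name": "Paper napkins", "category": "product", "unit_price": 0.02},
--     {"item_name": "Disposable cups", "category": "product", "unit_price": 0.10},
--     {"item_name": "Table covers", "category": "product", "unit_price": 1.50},
--     {"item_name": "Envelopes", "category": "product", "unit_price": 0.05},
--     {"item_name": "Sticky notes", "category": "product", "unit_price": 0.03},
--     {"item_name": "Notepads", "category": "product", "unit_price": 2.00},
--     {"item_name": "Invitation cards", "category": "product", "unit_price": 0.50},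
--     {"item_name": "Flyers", "category": "product", "unit_price": 0.15},
--     {"item_name": "Party streamers", "category": "product", "unit_price": 0.05},
--     {"item_name": "Decorative adhesive tape (washi tape)", "category": "product", "unit_price": 0.20},
--     {"item_name": "Paper party bags", "category": "product", "unit_price": 0.25},
--     {"item_name": "Name tags with lanyards", "category": "product", "unit_price": 0.75},
--     {"item_name": "Presentation folders", "category": "product", "unit_price": 0.50},
--
--     {"item_name": "Large poster paper (24x36 inches)", "category": "large_format", "unit_price": 1.00},
--     {"item_name": "Rolls of banner paper (36-inch width)", "category": "large_format", "unit_price": 2.50},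
--
--     {"item_name": "100 lb cover stock", "category": "specialty", "unit_price": 0.50},
--     {"item_name": "80 lb text paper", "category": "specialty", "unit_price": 0.40},
--     {"item_name": "250 gsm cardstock", "category": "specialty", "unit_price": 0.30},
--     {"item_name": "220 gsm poster paper", "category": "specialty", "unit_price": 0.35},
-- ]
--
-- def _match_item_name(request_text: str) -> str:
--     t = request_text.lower()
--     # prefer longer matches first
--     candidates = sorted([p["item_name"] for p in paper_supplies], key=len, reverse=True)
--     for name in candidates:
--         if name.lower() in t:
--             return name
--     # fallback: guess common words
--     if "a4" in t:
--         return "A4 paper"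
--     if "letter" in t:
--         return "Letter-sized paper"
--     if "cardstock" in t:
--         return "Cardstock"
--     return ""
-- ===== SOURCE B (Python) =====
-- paper_supplies = [
--     {"item_name": "A4 paper", "category": "paper", "unit_price": 0.05},
--     {"item_name": "Letter-sized paper", "category": "paper", "unit_price": 0.06},
--     {"item_name": "Cardstock", "category": "paper", "unit_price": 0.15},
--     {"item_name": "Colored paper", "category": "paper", "unit_price": 0.10},
--     {"item_name": "Glossy paper", "category": "paper", "unit_price": 0.20},
--     {"item_name": "Matte paper", "category": "paper", "unit_price": 0.18},
--     {"item_name": "Recycled paper", "category": "paper", "unit_price": 0.08},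
--     {"item_name": "Eco-friendly paper", "category": "paper", "unit_price": 0.12},
--     {"item_name": "Poster paper", "category": "paper", "unit_price": 0.25},
--     {"item_name": "Banner paper", "category": "paper", "unit_price": 0.30},
--     {"item_name": "Kraft paper", "category": "paper", "unit_price": 0.10},
--     {"item_name": "Construction paper", "category": "paper", "unit_price": 0.07},
--     {"item_name": "Wrapping paper", "category": "paper", "unit_price": 0.15},
--     {"item_name": "Glitter paper", "category": "paper", "unit_price": 0.22},
--     {"item_name": "Decorative paper", "category": "paper", "unit_price": 0.18},
--     {"item_name": "Letterhead paper", "category": "paper", "unit_price": 0.12},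
--     {"item_name": "Legal-size paper", "category": "paper", "unit_price": 0.08},
--     {"item_name": "Crepe paper", "category": "paper", "unit_price": 0.05},
--     {"item_name": "Photo paper", "category": "paper", "unit_price": 0.25},
--     {"item_name": "Uncoated paper", "category": "paper", "unit_price": 0.06},
--     {"item_name": "Butcher paper", "category": "paper", "unit_price": 0.10},
--     {"item_name": "Heavyweight paper", "category": "paper", "unit_price": 0.20},
--     {"item_name": "Standard copy paper", "category": "paper", "unit_price": 0.04},
--     {"item_name": "Bright-colored paper", "category": "paper", "unit_price": 0.12},
--     {"item_name": "Patterned paper", "category": "paper", "unit_price": 0.15},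
--
--     {"item_name": "Paper plates", "category": "product", "unit_price": 0.10},
--     {"item_name": "Paper cups", "category": "product", "unit_price": 0.08},
--     {"item_name": "Paper napkins", "category": "product", "unit_price": 0.02},
--     {"item_name": "Disposable cups", "category": "product", "unit_price": 0.10},
--     {"item_name": "Table covers", "category": "product", "unit_price": 1.50},
--     {"item_name": "Envelopes", "category": "product", "unit_price": 0.05},
--     {"item_name": "Sticky notes", "category": "product", "unit_price": 0.03},
--     {"item_name": "Notepads", "category": "product", "unit_price": 2.00},
--     {"item_name": "Invitation cards", "category": "product", "unit_price": 0.50},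
--     {"item_name": "Flyers", "category": "product", "unit_price": 0.15},
--     {"item_name": "Party streamers", "category": "product", "unit_price": 0.05},
--     {"item_name": "Decorative adhesive tape (washi tape)", "category": "product", "unit_price": 0.20},
--     {"item_name": "Paper party bags", "category": "product", "unit_price": 0.25},
--     {"item_name": "Name tags with lanyards", "category": "product", "unit_price": 0.75},
--     {"item_name": "Presentation folders", "category": "product", "unit_price": 0.50},
--
--     {"item_name": "Large poster paper (24x36 inches)", "category": "large_format", "unit_price": 1.00},
--     {"item_name": "Rolls of banner paper (36-inch width)", "category": "large_format", "unit_price": 2.50},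
--
--     {"item_name": "100 lb cover stock", "category": "specialty", "unit_price": 0.50},
--     {"item_name": "80 lb text paper", "category": "specialty", "unit_price": 0.40},
--     {"item_name": "250 gsm cardstock", "category": "specialty", "unit_price": 0.30},
--     {"item_name": "220 gsm poster paper", "category": "specialty", "unit_price": 0.35},
-- ]
--
-- _FALLBACKS = [("a4", "A4 paper"), ("letter", "Letter-sized paper"), ("cardstock", "Cardstock")]
--
--
-- def _match_item_name(request_text: str) -> str:
--     t = request_text.lower()
--     # single pass with a running best: keep the first strictly-longer match,
--     # which equals A's stable descending sort + first-match tie-break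
--     best = ""
--     for p in paper_supplies:
--         name = p["item_name"]
--         if len(name) > len(best) and name.lower() in t:
--             best = name
--     if best:
--         return best
--     # fallback keywords as a table instead of an if-chain
--     for word, name in _FALLBACKS:
--         if word in t:
--             return name
--     return ""
-- ===== Notes on version B (the rewrite author's own statement) =====
-- stated objective: simpler
-- what changed: B replaces A's sort-then-scan by a single pass with a running-best accumulator (keep the first strictly-longer matching name, which equals A's stable descending-sort first-match tie-break), and replaces the fallback if-chain by a keyword table scanned with one loop.
import Mathlib
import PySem

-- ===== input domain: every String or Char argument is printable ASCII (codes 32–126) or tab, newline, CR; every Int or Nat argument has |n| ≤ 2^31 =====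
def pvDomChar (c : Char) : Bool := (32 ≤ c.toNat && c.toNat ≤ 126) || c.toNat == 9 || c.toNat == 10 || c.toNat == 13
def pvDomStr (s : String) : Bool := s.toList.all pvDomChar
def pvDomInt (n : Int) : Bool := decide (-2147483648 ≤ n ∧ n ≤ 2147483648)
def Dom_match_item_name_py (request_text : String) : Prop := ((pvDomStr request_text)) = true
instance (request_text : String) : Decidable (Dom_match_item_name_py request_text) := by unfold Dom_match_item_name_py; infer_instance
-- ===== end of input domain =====

-- B replaces A's sort-then-scan by one pass with a running-best accumulator (first strictly-longer
-- match = A's stable descending sort + first-match tie-break) and a keyword table for the fallback (simpler).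
-- The module constant paper_supplies is ported as the list of its item_name fields, the only field
-- either function reads (unit_price is a float and is never used).

-- ===== PORT A =====
def paperSupplyNames : List String :=
  ["A4 paper", "Letter-sized paper", "Cardstock", "Colored paper", "Glossy paper", "Matte paper",
   "Recycled paper", "Eco-friendly paper", "Poster paper", "Banner paper", "Kraft paper",
   "Construction paper", "Wrapping paper", "Glitter paper", "Decorative paper", "Letterhead paper",
   "Legal-size paper", "Crepe paper", "Photo paper", "Uncoated paper", "Butcher paper",
   "Heavyweight paper", "Standard copy paper", "Bright-colored paper", "Patterned paper",
   "Paper plates", "Paper cups", "Paper napkins", "Disposable cups", "Table covers", "Envelopes",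
   "Sticky notes", "Notepads", "Invitation cards", "Flyers", "Party streamers",
   "Decorative adhesive tape (washi tape)", "Paper party bags", "Name tags with lanyards",
   "Presentation folders", "Large poster paper (24x36 inches)",
   "Rolls of banner paper (36-inch width)", "100 lb cover stock", "80 lb text paper",
   "250 gsm cardstock", "220 gsm poster paper"]

def match_item_name_py (request_text : String) : String :=
  let t := PySem.Str.lower request_text
  -- prefer longer matches first
  let candidates := PySem.List.sorted paperSupplyNames (fun s => PySem.Str.len s) true
  match candidates.find? (fun name => PySem.Str.isIn (PySem.Str.lower name) t) with
  | some name => name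
  | none =>
    -- fallback: guess common words
    if PySem.Str.isIn "a4" t then "A4 paper"
    else if PySem.Str.isIn "letter" t then "Letter-sized paper"
    else if PySem.Str.isIn "cardstock" t then "Cardstock"
    else ""

-- ===== PORT B =====
def fallbackPairs : List (String × String) :=
  [("a4", "A4 paper"), ("letter", "Letter-sized paper"), ("cardstock", "Cardstock")]

def match_item_name_py_alt (request_text : String) : String :=
  let t := PySem.Str.lower request_text
  -- single pass with a running best: keep the first strictly-longer match
  let best := paperSupplyNames.foldl
    (fun best name =>
      if decide (PySem.Str.len best < PySem.Str.len name)
          && PySem.Str.isIn (PySem.Str.lower name) t then name else best) ""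
  if best = "" then
    -- fallback keywords as a table instead of an if-chain
    match fallbackPairs.find? (fun pr => PySem.Str.isIn pr.1 t) with
    | some pr => pr.2
    | none => ""
  else best

-- ===== PRECONDITION & SPEC =====
def Spec_match_item_name_py (request_text : String) (out : String) : Prop := out = match_item_name_py_alt request_text
instance (request_text : String) (out : String) : Decidable (Spec_match_item_name_py request_text out) := by unfold Spec_match_item_name_py; infer_instance

-- ===== CLAIM (what is proved, stated in full; the proofs are below) =====
def Claim_equal_match_item_name_py : Prop := ∀ (request_text : String), Dom_match_item_name_py request_text → Spec_match_item_name_py request_text (match_item_name_py request_text)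

-- ===== LEMMAS AND PROOFS =====

-- inserting an element that fails P does not change the first P-match
lemma find?_insertBy_neg {α : Type} (b : α → α → Bool) (P : α → Bool) (x : α)
    (hx : P x = false) :
    ∀ s : List α, (PySem.List.insertBy b x s).find? P = s.find? P := by
  intro s
  induction s with
  | nil => simp [PySem.List.insertBy, List.find?, hx]
  | cons y ys ih =>
    by_cases hb : b x y = true
    · simp [PySem.List.insertBy, hb, List.find?, hx]
    · simp only [PySem.List.insertBy] at *
      simp [hb, List.find?]
      cases hPy : P y <;> simp [ih]

-- inserting a P-element into a descending list: the first P-match becomes the Python max-step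
lemma find?_insertBy_pos {α : Type} (key : α → Int) (P : α → Bool) (x : α)
    (hx : P x = true) :
    ∀ s : List α, s.Pairwise (fun a b => key b ≤ key a) →
    (PySem.List.insertBy (fun a b => decide (key b < key a)) x s).find? P =
      (match s.find? P with
       | none => some x
       | some m => if key m < key x then some x else some m) := by
  intro s
  induction s with
  | nil => intro _; simp [PySem.List.insertBy, List.find?, hx]
  | cons y ys ih =>
    intro hpw
    have hhead : ∀ m ∈ y :: ys, key m ≤ key y := by
      intro m hm
      rcases List.mem_cons.mp hm with h | h
      · exact le_of_eq (congrArg key h)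
      · exact (List.pairwise_cons.mp hpw).1 m h
    by_cases hb : key y < key x
    · -- x goes in front
      have : (PySem.List.insertBy (fun a b => decide (key b < key a)) x (y :: ys)) = x :: y :: ys := by
        simp [PySem.List.insertBy, hb]
      rw [this]
      cases hfind : (y :: ys).find? P with
      | none => simp [List.find?, hx]
      | some m =>
        have hm : m ∈ y :: ys := List.mem_of_find?_eq_some hfind
        have : key m < key x := lt_of_le_of_lt (hhead m hm) hb
        simp [List.find?, hx, this]
    · -- x goes after y
      have hrw : (PySem.List.insertBy (fun a b => decide (key b < key a)) x (y :: ys)) =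
          y :: PySem.List.insertBy (fun a b => decide (key b < key a)) x ys := by
        simp [PySem.List.insertBy, hb]
      rw [hrw]
      cases hPy : P y with
      | true =>
        have hyx : ¬ key y < key x := hb
        simp [List.find?, hPy, hyx]
      | false =>
        simp [List.find?, hPy]
        exact ih (List.pairwise_cons.mp hpw).2

-- the Python max of u ++ [x] is one max-step past the max of u
lemma max?_append_singleton {α : Type} (key : α → Int) (x : α) (u : List α) :
    PySem.List.max? (u ++ [x]) key =
      (match PySem.List.max? u key with
       | none => some x
       | some m => if key m < key x then some x else some m) := by
  simp only [PySem.List.max?, List.foldl_append, List.foldl_cons, List.foldl_nil]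
  rfl

-- first match in the stable descending sort = Python max (first maximal) of the filtered list
lemma find?_sorted_rev_eq_max?_filter {α : Type} (key : α → Int) (P : α → Bool) (l : List α) :
    (PySem.List.sorted l key true).find? P = PySem.List.max? (l.filter P) key := by
  induction l using List.reverseRecOn with
  | nil => rfl
  | append_singleton l x ih =>
    have hs : PySem.List.sorted (l ++ [x]) key true =
        PySem.List.insertBy (fun a b => decide (key b < key a)) x (PySem.List.sorted l key true) := by
      rw [PySem.List.sorted_rev_eq_foldl_insertBy, PySem.List.sorted_rev_eq_foldl_insertBy,
        List.foldl_append]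
      rfl
    cases hPx : P x with
    | false =>
      rw [hs, find?_insertBy_neg _ _ _ hPx, ih, List.filter_append]
      simp [hPx]
    | true =>
      rw [hs, find?_insertBy_pos key P x hPx _ (PySem.List.sorted_pairwise_rev l key),
        ih, List.filter_append]
      have hfx : List.filter P [x] = [x] := by simp [hPx]
      rw [hfx, max?_append_singleton]

-- B's running-best loop computes the Python max of the filtered list (vs. the start accumulator)
lemma foldl_best_eq_max?_filter {α : Type} (key : α → Int) (P : α → Bool) (l : List α) :
    ∀ acc : α,
    l.foldl (fun b x => if decide (key b < key x) && P x then x else b) acc =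
      (match PySem.List.max? (l.filter P) key with
       | none => acc
       | some m => if key acc < key m then m else acc) := by
  induction l using List.reverseRecOn with
  | nil => intro acc; rfl
  | append_singleton l x ih =>
    intro acc
    rw [List.foldl_append, List.foldl_cons, List.foldl_nil, ih, List.filter_append]
    cases hPx : P x with
    | false =>
      simp only [Bool.and_false]
      simp [hPx]
    | true =>
      have hfx : List.filter P [x] = [x] := by simp [hPx]
      rw [hfx, max?_append_singleton]
      cases hm : PySem.List.max? (List.filter P l) key with
      | none => simp
      | some m =>
        by_cases h1 : key m < key x
        · simp only [h1, if_pos]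
          by_cases h2 : key acc < key m
          · have : key acc < key x := lt_trans h2 h1
            simp [h2, h1, this]
          · simp [h2]
        · simp only [h1]
          by_cases h2 : key acc < key m
          · simp [h2, h1]
          · have : ¬ key acc < key x := by omega
            simp [h2, this]

-- every supply name is nonempty
lemma paperSupplyNames_ne_empty : ∀ m ∈ paperSupplyNames, m ≠ "" := by decide

-- ===== VERDICT (by name: the statement is the Claim_ definition above) =====
theorem match_item_name_py_spec : Claim_equal_match_item_name_py := by
  intro request_text _
  show match_item_name_py request_text = match_item_name_py_alt request_text
  simp only [match_item_name_py, match_item_name_py_alt]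
  rw [find?_sorted_rev_eq_max?_filter, foldl_best_eq_max?_filter]
  set t := PySem.Str.lower request_text with ht
  set P : String → Bool := fun name => PySem.Str.isIn (PySem.Str.lower name) t with hP
  cases hm : PySem.List.max? (List.filter P paperSupplyNames) (fun s => PySem.Str.len s) with
  | none =>
    rw [if_pos rfl]
    simp only [fallbackPairs, List.find?]
    by_cases h1 : PySem.Chars.isIn ['a', '4'] t.toList = true
    · simp [h1]
    · by_cases h2 : PySem.Chars.isIn ['l', 'e', 't', 't', 'e', 'r'] t.toList = true
      · simp [h1, h2]
      · by_cases h3 : PySem.Chars.isIn ['c', 'a', 'r', 'd', 's', 't', 'o', 'c', 'k'] t.toList = true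
        · simp [h1, h2, h3]
        · simp [h1, h2, h3]
  | some m =>
    have hmem : m ∈ paperSupplyNames :=
      (List.mem_filter.mp (PySem.List.max?_mem hm)).1
    have hne : m ≠ "" := paperSupplyNames_ne_empty m hmem
    simp [hne]
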